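-- pv_equiv track=rewrite | github.com/MohHallal/alignement_clustal_W | alignement_global.py | alignement_sequences_global
-- ===== SOURCE A (Python) =====
-- def alignement_sequences_global(algnA, algnB, alignment_cordonnés):
--     """ Uses the coordinates to generate the alignment between the sequences """
--     if isinstance(algnA, tuple):
--         pass
--     else:
--         algnA = tuple([algnA])
--     if isinstance(algnB, tuple):
--         pass
--     else:
--         algnB = tuple([algnB])
--     longueur = len(alignment_cordonnés)
--     nbr_seqs_A = len(algnA)
--     nbr_seqs_B = len(algnB)
--     algnA_aligned = []
--     algnB_aligned = []
--     for _ in range(nbr_seqs_A):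
--         algnA_aligned.append("")
--     for _ in range(nbr_seqs_B):
--         algnB_aligned.append("")
--     for i in range(1,longueur):
--         if alignment_cordonnés[i][0][0] == alignment_cordonnés[i-1][0][0]:
--             for j in range(nbr_seqs_A):
--                 algnA_aligned[j] = algnA_aligned[j] + "-"
--         if alignment_cordonnés[i][0][1] == alignment_cordonnés[i-1][0][1]:
--             for j in range(nbr_seqs_B):
--                 algnB_aligned[j] = algnB_aligned[j] + "-"
--         if alignment_cordonnés[i][0][0] != alignment_cordonnés[i-1][0][0]:
--             for j in range(nbr_seqs_A):
--                 algnA_aligned[j] = algnA_aligned[j] + algnA[j][alignment_cordonnés[i-1][0][0]-1]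
--         if alignment_cordonnés[i][0][1] != alignment_cordonnés[i-1][0][1]:
--             for j in range(nbr_seqs_B):
--                 algnB_aligned[j] = algnB_aligned[j] + algnB[j][alignment_cordonnés[i-1][0][1]-1]
--
--     for i in range(nbr_seqs_B):
--         algnA_aligned.append(algnB_aligned[i])
--     return tuple(algnA_aligned)
-- ===== SOURCE B (Python) =====
-- def alignement_sequences_global(algnA, algnB, alignment_cordonnés):
--     """Uses the coordinates to generate the alignment between the sequences.
--
--     Different decomposition: first compile the coordinate path into two op
--     tables (None = gap, otherwise the source index), then render each
--     sequence in one join pass over its op table."""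
--     if not isinstance(algnA, tuple):
--         algnA = (algnA,)
--     if not isinstance(algnB, tuple):
--         algnB = (algnB,)
--     pairs = list(zip(alignment_cordonnés, alignment_cordonnés[1:]))
--     a_ops = [None if cur[0][0] == prev[0][0] else prev[0][0] - 1
--              for prev, cur in pairs]
--     b_ops = [None if cur[0][1] == prev[0][1] else prev[0][1] - 1
--              for prev, cur in pairs]
--     out = ["".join("-" if t is None else seq[t] for t in a_ops) for seq in algnA]
--     out += ["".join("-" if t is None else seq[t] for t in b_ops) for seq in algnB]
--     return tuple(out)
-- ===== Notes on version B (the rewrite author's own statement) =====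
-- stated objective: alternative
-- what changed: A interleaves gap/copy decisions and string building in one position-by-position loop with four conditional appends; B first compiles the coordinate path into two op tables (None = gap, else source index) via a zip over consecutive path points, then renders each side in a single join pass over its table.
import Mathlib
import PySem

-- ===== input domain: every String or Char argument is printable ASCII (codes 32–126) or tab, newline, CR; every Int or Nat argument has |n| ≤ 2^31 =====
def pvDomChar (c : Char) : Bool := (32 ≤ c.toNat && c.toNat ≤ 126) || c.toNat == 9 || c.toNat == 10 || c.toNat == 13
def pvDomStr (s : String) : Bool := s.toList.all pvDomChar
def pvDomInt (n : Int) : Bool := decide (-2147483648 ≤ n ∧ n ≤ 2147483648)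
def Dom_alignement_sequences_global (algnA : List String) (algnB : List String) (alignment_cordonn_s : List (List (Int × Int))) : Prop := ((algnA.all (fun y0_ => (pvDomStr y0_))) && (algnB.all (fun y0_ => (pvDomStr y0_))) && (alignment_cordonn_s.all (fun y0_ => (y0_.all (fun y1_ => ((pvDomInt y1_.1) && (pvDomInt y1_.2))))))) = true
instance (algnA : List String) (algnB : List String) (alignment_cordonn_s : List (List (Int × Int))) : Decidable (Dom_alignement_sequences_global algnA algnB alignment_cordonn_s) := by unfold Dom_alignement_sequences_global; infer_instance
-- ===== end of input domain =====

-- B replaces A's interleaved position×sequence loop by precompiled op tables (gap / source index)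
-- rendered per sequence in one join pass (objective: alternative decomposition; same cost class).


-- ===== PORT A =====
-- The arguments arrive as tuples of sequences, so the isinstance(…, tuple) wrapping is a no-op.
-- String concatenation is carried as List Char (String.ofList at the end) because Lean's
-- String.append is opaque to the kernel; this is exact. Python's seq[c-1] char access is
-- PySem.List.pyGet? on seq.toList (negative index from the end); its IndexError case (and an
-- empty coordinate row's row[0]) returns a default here and is excluded by Pre_.
def alignement_sequences_global (algnA : List String) (algnB : List String) (alignment_cordonn_s : List (List (Int × Int))) : List String :=
  let longueur := alignment_cordonn_s.length
  let st := (List.range' 1 (longueur - 1)).foldl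
    (fun (st : List (List Char) × List (List Char)) i =>
      let cur := (alignment_cordonn_s.getD i []).headD (0, 0)
      let prev := (alignment_cordonn_s.getD (i - 1) []).headD (0, 0)
      -- 'for j in range(nbr_seqs): aligned[j] = aligned[j] + …' = pointwise update over the
      -- accumulators zipped with their source sequences
      let sA := if cur.1 = prev.1 then st.1.map (fun acc => acc ++ ['-']) else st.1
      let sB := if cur.2 = prev.2 then st.2.map (fun acc => acc ++ ['-']) else st.2
      let sA := if cur.1 ≠ prev.1 then
          List.zipWith (fun acc seq => acc ++ (match PySem.List.pyGet? seq.toList (prev.1 - 1) with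
            | some ch => [ch] | none => [])) sA algnA
        else sA
      let sB := if cur.2 ≠ prev.2 then
          List.zipWith (fun acc seq => acc ++ (match PySem.List.pyGet? seq.toList (prev.2 - 1) with
            | some ch => [ch] | none => [])) sB algnB
        else sB
      (sA, sB))
    (List.replicate algnA.length [], List.replicate algnB.length [])
  (st.1 ++ st.2).map String.ofList

-- ===== PORT B =====
-- ''.join over List Char chunks is exactly concatenation: flatten.
def pvRender (seq : String) (ops : List (Option Int)) : String :=
  String.ofList (ops.map (fun t => match t with
    | none => ['-']
    | some i => (match PySem.List.pyGet? seq.toList i with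
        | some ch => [ch] | none => []))).flatten

def alignement_sequences_global_alt (algnA : List String) (algnB : List String) (alignment_cordonn_s : List (List (Int × Int))) : List String :=
  let pairs := alignment_cordonn_s.zip (alignment_cordonn_s.drop 1)
  let a_ops := pairs.map (fun pr =>
    if (pr.2.headD (0, 0)).1 = (pr.1.headD (0, 0)).1 then none else some ((pr.1.headD (0, 0)).1 - 1))
  let b_ops := pairs.map (fun pr =>
    if (pr.2.headD (0, 0)).2 = (pr.1.headD (0, 0)).2 then none else some ((pr.1.headD (0, 0)).2 - 1))
  algnA.map (fun seq => pvRender seq a_ops) ++ algnB.map (fun seq => pvRender seq b_ops)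

-- ===== PRECONDITION & SPEC =====
-- Pre_ = exactly the inputs on which Python A returns: when the path has ≥ 2 points, every row
-- must be nonempty (A reads row[0] of each) and every consumed source index must be a valid
-- Python index into every string of the side that consumes it.
def Pre_alignement_sequences_global (algnA : List String) (algnB : List String) (alignment_cordonn_s : List (List (Int × Int))) : Prop :=
  2 ≤ alignment_cordonn_s.length →
  ((∀ row ∈ alignment_cordonn_s, row ≠ []) ∧
   ∀ k ∈ List.range (alignment_cordonn_s.length - 1),
     (((alignment_cordonn_s.getD (k+1) []).headD (0,0)).1 ≠ ((alignment_cordonn_s.getD k []).headD (0,0)).1 →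
        ∀ s ∈ algnA, PySem.Raise.InRange s.toList.length (((alignment_cordonn_s.getD k []).headD (0,0)).1 - 1)) ∧
     (((alignment_cordonn_s.getD (k+1) []).headD (0,0)).2 ≠ ((alignment_cordonn_s.getD k []).headD (0,0)).2 →
        ∀ s ∈ algnB, PySem.Raise.InRange s.toList.length (((alignment_cordonn_s.getD k []).headD (0,0)).2 - 1)))
instance (algnA : List String) (algnB : List String) (alignment_cordonn_s : List (List (Int × Int))) : Decidable (Pre_alignement_sequences_global algnA algnB alignment_cordonn_s) := by unfold Pre_alignement_sequences_global; infer_instance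

def pvWitness_alignement_sequences_global : List String × List String × (List (List (Int × Int))) :=
  (["ab", "cd"], ["x", "y"], [[(1,1)], [(2,1)], [(2,2)]])

def Spec_alignement_sequences_global (algnA : List String) (algnB : List String) (alignment_cordonn_s : List (List (Int × Int))) (out : List String) : Prop := out = alignement_sequences_global_alt algnA algnB alignment_cordonn_s
instance (algnA : List String) (algnB : List String) (alignment_cordonn_s : List (List (Int × Int))) (out : List String) : Decidable (Spec_alignement_sequences_global algnA algnB alignment_cordonn_s out) := by unfold Spec_alignement_sequences_global; infer_instance

-- ===== CLAIM (what is proved, stated in full; the proofs are below) =====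
def Claim_equal_alignement_sequences_global : Prop := ∀ (algnA : List String) (algnB : List String) (alignment_cordonn_s : List (List (Int × Int))), Dom_alignement_sequences_global algnA algnB alignment_cordonn_s → Pre_alignement_sequences_global algnA algnB alignment_cordonn_s → Spec_alignement_sequences_global algnA algnB alignment_cordonn_s (alignement_sequences_global algnA algnB alignment_cordonn_s)

-- ===== LEMMAS AND PROOFS =====

-- the chunk A's loop appends to the accumulator of sequence seq at position i (gap or copied char)
def pvChunk (seq : String) (coords : List (List (Int × Int))) (proj : Int × Int → Int) (i : Nat) : List Char :=
  if proj ((coords.getD i []).headD (0,0)) = proj ((coords.getD (i-1) []).headD (0,0)) then ['-']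
  else (match PySem.List.pyGet? seq.toList (proj ((coords.getD (i-1) []).headD (0,0)) - 1) with
    | some ch => [ch] | none => [])

theorem pv_zipWith_append_map {α : Type} (l : List String) (f : String → List α) (c : String → List α) :
    List.zipWith (fun acc seq => acc ++ c seq) (l.map f) l = l.map (fun s => f s ++ c s) := by
  induction l with
  | nil => rfl
  | cons x xs ih => simp [ih]

-- A's loop appends exactly one chunk per position to each sequence's accumulator
theorem pv_fold_eq (algnA algnB : List String) (coords : List (List (Int × Int)))
    (L : List Nat) (f g : String → List Char) :
    L.foldl (fun (st : List (List Char) × List (List Char)) i =>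
      let cur := (coords.getD i []).headD (0, 0)
      let prev := (coords.getD (i - 1) []).headD (0, 0)
      let sA := if cur.1 = prev.1 then st.1.map (fun acc => acc ++ ['-']) else st.1
      let sB := if cur.2 = prev.2 then st.2.map (fun acc => acc ++ ['-']) else st.2
      let sA := if cur.1 ≠ prev.1 then
          List.zipWith (fun acc seq => acc ++ (match PySem.List.pyGet? seq.toList (prev.1 - 1) with
            | some ch => [ch] | none => [])) sA algnA
        else sA
      let sB := if cur.2 ≠ prev.2 then
          List.zipWith (fun acc seq => acc ++ (match PySem.List.pyGet? seq.toList (prev.2 - 1) with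
            | some ch => [ch] | none => [])) sB algnB
        else sB
      (sA, sB)) (algnA.map f, algnB.map g)
    = (algnA.map (fun s => f s ++ (L.map (pvChunk s coords Prod.fst)).flatten),
       algnB.map (fun s => g s ++ (L.map (pvChunk s coords Prod.snd)).flatten)) := by
  induction L generalizing f g with
  | nil => simp
  | cons x xs ih =>
    simp only [List.foldl_cons]
    have hstep : ∀ (sAB : List (List Char) × List (List Char)), sAB = (algnA.map f, algnB.map g) →
        (let cur := (coords.getD x []).headD (0, 0)
         let prev := (coords.getD (x - 1) []).headD (0, 0)
         let sA := if cur.1 = prev.1 then sAB.1.map (fun acc => acc ++ ['-']) else sAB.1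
         let sB := if cur.2 = prev.2 then sAB.2.map (fun acc => acc ++ ['-']) else sAB.2
         let sA := if cur.1 ≠ prev.1 then
             List.zipWith (fun acc seq => acc ++ (match PySem.List.pyGet? seq.toList (prev.1 - 1) with
               | some ch => [ch] | none => [])) sA algnA
           else sA
         let sB := if cur.2 ≠ prev.2 then
             List.zipWith (fun acc seq => acc ++ (match PySem.List.pyGet? seq.toList (prev.2 - 1) with
               | some ch => [ch] | none => [])) sB algnB
           else sB
         (sA, sB))
        = (algnA.map (fun s => f s ++ pvChunk s coords Prod.fst x),
           algnB.map (fun s => g s ++ pvChunk s coords Prod.snd x)) := by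
      intro sAB hs; subst hs
      by_cases hA : ((coords[x]?.getD []).head?.getD (0,0)).1 = ((coords[x-1]?.getD []).head?.getD (0,0)).1 <;>
        by_cases hB : ((coords[x]?.getD []).head?.getD (0,0)).2 = ((coords[x-1]?.getD []).head?.getD (0,0)).2 <;>
          simp [hA, hB, pvChunk, pv_zipWith_append_map, List.map_map, Function.comp_def]
    rw [hstep _ rfl, ih]
    simp [List.append_assoc]

-- the precompiled op table rendered for seq IS the list of A's chunks, position by position
theorem pv_map_chunk (seq : String) (coords : List (List (Int × Int))) (proj : Int × Int → Int) :
    (List.range' 1 (coords.length - 1)).map (pvChunk seq coords proj)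
      = ((coords.zip (coords.drop 1)).map (fun pr =>
            if proj (pr.2.headD (0,0)) = proj (pr.1.headD (0,0)) then none
            else some (proj (pr.1.headD (0,0)) - 1))).map
          (fun t => match t with
            | none => ['-']
            | some i => (match PySem.List.pyGet? seq.toList i with
                | some ch => [ch] | none => [])) := by
  apply List.ext_getElem
  · simp
  · intro k h1 h2
    have hk1 : 1 + k < coords.length := by simp at h1; omega
    have hk : k < coords.length := by omega
    have hdk : k < (coords.drop 1).length := by simp; omega
    simp only [List.getElem_map, List.getElem_range', List.getElem_zip]
    have hdrop : (coords.drop 1)[k]'hdk = coords[1 + k]'hk1 := by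
      rw [List.getElem_drop]
    have e1 : coords[1+k]? = some (coords[1+k]'hk1) := List.getElem?_eq_getElem hk1
    have e2 : coords[k]? = some (coords[k]'hk) := List.getElem?_eq_getElem hk
    simp only [pvChunk, Nat.one_mul, Nat.add_sub_cancel_left, List.getD_eq_getElem?_getD,
      e1, e2, Option.getD_some, hdrop]
    by_cases h : proj ((coords[1+k]'hk1).head?.getD (0,0)) = proj ((coords[k]'hk).head?.getD (0,0)) <;>
      simp [h]

-- ===== VERDICT (by name: the statement is the Claim_ definition above) =====
theorem alignement_sequences_global_spec : Claim_equal_alignement_sequences_global := by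
  unfold Claim_equal_alignement_sequences_global
  intro algnA algnB coords _ _
  simp only [Spec_alignement_sequences_global, alignement_sequences_global,
    alignement_sequences_global_alt, pvRender]
  have hrepA : List.replicate algnA.length ([] : List Char) = algnA.map (fun _ => []) := by
    simp [List.map_const']
  have hrepB : List.replicate algnB.length ([] : List Char) = algnB.map (fun _ => []) := by
    simp [List.map_const']
  rw [hrepA, hrepB, pv_fold_eq]
  simp only [List.nil_append, List.map_append, List.map_map, Function.comp_def]
  congr 1
  · apply List.map_congr_left; intro s _
    rw [pv_map_chunk s coords Prod.fst]
    simp [Function.comp_def]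
  · apply List.map_congr_left; intro s _
    rw [pv_map_chunk s coords Prod.snd]
    simp [Function.comp_def]
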